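-- pv_equiv track=rewrite | github.com/vnguyen01/CS287 | HW2/preprocess.py | word_process
-- ===== SOURCE A (Python) =====
-- def is_float(c):
--     if c.isdigit():
--         return True
--     if c == ',':
--         return True
--     return False
--
-- def word_process(word):
--     #Realized that this can be done much easier with regular expresions...
--     #Removes digits and replaces them with the string 'NUMBER'
--     flag = 0
--     interval = [0,0]
--     intervals = []
--     processed = ''
--     if len(word) == 1 and (not word.isdigit()):
--         return word
--     for i in range(0,len(word)):
--         if flag == 0:
--             if is_float(word[i]):
--                 flag = 1
--                 interval[0] = i
--                 #if len(word) == 1: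
--                     #intervals.append((0,0))
--                 if i == len(word)-1:
--                     intervals.append((interval[0], interval[0]+1))
--         else:
--             if (not is_float(word[i])):
--                 flag = 0
--                 interval[1] = i-1
--                 intervals.append((interval[0],interval[1]))
--             elif i == len(word) -1:
--                 interval[1] = i
--                 intervals.append((interval[0],interval[1]))
--
--     index = 0
--     for pair in intervals:
--         prefix = word[index:pair[0]]
--         index = pair[1]+1
--         processed = processed + prefix + 'NUMBER'
--
--     processed = processed + word[index:]
--     return processed
-- ===== SOURCE B (Python) =====
-- def is_float(c):
--     if c.isdigit():
--         return True
--     if c == ',':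
--         return True
--     return False
--
-- def word_process(word):
--     # Single streaming pass: emit 'NUMBER' once per maximal run of digit/comma
--     # characters, copying all other characters through (same lone-char guard as A).
--     if len(word) == 1 and (not word.isdigit()):
--         return word
--     out = []
--     in_run = False
--     for c in word:
--         if is_float(c):
--             if not in_run:
--                 out.append('NUMBER')
--                 in_run = True
--         else:
--             out.append(c)
--             in_run = False
--     return ''.join(out)
-- ===== Notes on version B (the rewrite author's own statement) =====
-- stated objective: simpler
-- what changed: Replaces A's two-phase design (an index loop building an intervals table of run boundaries, then a slice-and-rebuild pass over that table) with a single streaming pass over the characters that keeps one in_run flag and emits 'NUMBER' once per run, keeping A's lone-character guard.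
import Mathlib
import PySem

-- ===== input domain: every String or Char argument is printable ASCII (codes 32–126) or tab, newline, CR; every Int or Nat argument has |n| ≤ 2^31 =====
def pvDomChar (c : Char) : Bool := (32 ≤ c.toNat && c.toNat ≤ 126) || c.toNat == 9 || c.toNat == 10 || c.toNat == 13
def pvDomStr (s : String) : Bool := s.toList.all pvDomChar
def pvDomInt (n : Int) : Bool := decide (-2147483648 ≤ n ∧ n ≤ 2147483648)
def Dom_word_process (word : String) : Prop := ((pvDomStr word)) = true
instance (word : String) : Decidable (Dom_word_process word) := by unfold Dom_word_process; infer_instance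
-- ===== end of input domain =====

-- B replaces A's interval-table-then-rebuild two-phase design with one streaming
-- pass keeping an in_run flag; same return value, proved equal on the domain.


-- ===== PORT A =====
-- helper is_float(c): c is a single character here, so c.isdigit() is Chars.isdigit
def is_float (c : Char) : Bool :=
  if PySem.Chars.isdigit c then true
  else if c = ',' then true
  else false

def numChars : List Char := ['N', 'U', 'M', 'B', 'E', 'R']

-- the body of A's 'for i in range(0, len(word))' loop; word[i] is always in range,
-- ported with pyGetD; state = (flag, interval, intervals)
def wpA_body (cs : List Char) (st : Int × (Int × Int) × List (Int × Int)) (i : Int) :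
    Int × (Int × Int) × List (Int × Int) :=
  let (flag, interval, intervals) := st
  if flag = 0 then
    if is_float (PySem.List.pyGetD cs i ' ') then
      let interval := (i, interval.2)
      if i = (cs.length : Int) - 1 then
        (1, interval, intervals ++ [(interval.1, interval.1 + 1)])
      else (1, interval, intervals)
    else (flag, interval, intervals)
  else
    if ¬ is_float (PySem.List.pyGetD cs i ' ') then
      let interval := (interval.1, i - 1)
      (0, interval, intervals ++ [(interval.1, interval.2)])
    else if i = (cs.length : Int) - 1 then
      let interval := (interval.1, i)
      (flag, interval, intervals ++ [(interval.1, interval.2)])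
    else (flag, interval, intervals)

-- the second loop: 'for pair in intervals', state = (index, processed)
def wpA_rebuild (cs : List Char) (st : Int × List Char) (pair : Int × Int) :
    Int × List Char :=
  (pair.2 + 1, st.2 ++ PySem.Chars.slice cs (some st.1) (some pair.1) ++ numChars)

def word_process (word : String) : String :=
  if word.toList.length = 1 ∧ ¬ PySem.Chars.strIsdigit word.toList then word
  else
    let cs := word.toList
    let final := (PySem.List.pyRange 0 (cs.length : Int) 1).foldl (wpA_body cs) (0, (0, 0), [])
    let rebuilt := final.2.2.foldl (wpA_rebuild cs) (0, [])
    String.ofList (rebuilt.2 ++ PySem.Chars.slice cs (some rebuilt.1) none)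

-- ===== PORT B =====
-- B's single pass: out is the list of appended chunks, ''.join = flatten
def wpB_loop (rest : List Char) (inRun : Bool) (out : List (List Char)) : List (List Char) :=
  match rest with
  | [] => out
  | c :: r =>
    if is_float c then
      if !inRun then wpB_loop r true (out ++ [numChars])
      else wpB_loop r true out
    else wpB_loop r false (out ++ [[c]])

def word_process_alt (word : String) : String :=
  if word.toList.length = 1 ∧ ¬ PySem.Chars.strIsdigit word.toList then word
  else String.ofList (wpB_loop word.toList false []).flatten

-- ===== PRECONDITION & SPEC =====
def Spec_word_process (word : String) (out : String) : Prop := out = word_process_alt word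
instance (word : String) (out : String) : Decidable (Spec_word_process word out) := by unfold Spec_word_process; infer_instance

-- ===== CLAIM (what is proved, stated in full; the proofs are below) =====
def Claim_equal_word_process : Prop := ∀ (word : String), Dom_word_process word → Spec_word_process word (word_process word)

-- ===== LEMMAS AND PROOFS =====

-- clean spec: g = output outside a run, gRun = output inside a run (NUMBER already emitted)
mutual
def wpG : List Char → List Char
  | [] => []
  | c :: r => if is_float c then numChars ++ wpGRun r else c :: wpG r
def wpGRun : List Char → List Char
  | [] => []
  | c :: r => if is_float c then wpGRun r else c :: wpG r
end

-- B's accumulator loop computes wpG / wpGRun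
theorem wpB_loop_flatten (rest : List Char) : ∀ (inRun : Bool) (out : List (List Char)),
    (wpB_loop rest inRun out).flatten
      = out.flatten ++ (if inRun then wpGRun rest else wpG rest) := by
  induction rest with
  | nil => intro inRun out; cases inRun <;> simp [wpB_loop, wpG, wpGRun]
  | cons c r ih =>
    intro inRun out
    cases inRun <;> by_cases hc : is_float c <;>
      simp [wpB_loop, hc, wpG, wpGRun, ih]

-- the intervals A's first loop emits from position i on, flag = 0 / flag = 1 (run open at a)
mutual
def delta0 (cs : List Char) : List Char → Nat → List (Int × Int)
  | [], _ => []
  | c :: r, i =>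
    if is_float c then
      if r = [] then [((i : Int), (i : Int) + 1)] else delta1 cs r (i + 1) i
    else delta0 cs r (i + 1)
def delta1 (cs : List Char) : List Char → Nat → Nat → List (Int × Int)
  | [], _, _ => []
  | c :: r, i, a =>
    if is_float c then
      if r = [] then [((a : Int), (i : Int))] else delta1 cs r (i + 1) a
    else ((a : Int), (i : Int) - 1) :: delta0 cs r (i + 1)
end

-- basic consequences of cs.drop i = c :: r
theorem wp_drop_succ (cs : List Char) {i : Nat} {c : Char} {r : List Char}
    (h : cs.drop i = c :: r) : cs.drop (i + 1) = r := by
  have := congrArg (List.drop 1) h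
  simpa [List.drop_drop, Nat.add_comm] using this

theorem wp_getElem? (cs : List Char) {i : Nat} {c : Char} {r : List Char}
    (h : cs.drop i = c :: r) : cs[i]? = some c := by
  have := List.getElem?_drop (xs := cs) (i := i) (j := 0)
  rw [h] at this; simpa using this.symm

theorem wp_len (cs : List Char) {i : Nat} {c : Char} {r : List Char}
    (h : cs.drop i = c :: r) : cs.length = i + 1 + r.length := by
  have h1 := congrArg List.length h; simp at h1
  have h2 : i < cs.length := by omega
  omega

-- extending a take-slice by the character at position i
theorem wp_take_succ (cs : List Char) {i idx : Nat} {c : Char} {r : List Char}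
    (h : cs.drop i = c :: r) (hidx : idx ≤ i) :
    List.take (i + 1 - idx) (cs.drop idx) = List.take (i - idx) (cs.drop idx) ++ [c] := by
  rw [show i + 1 - idx = (i - idx) + 1 from by omega, List.take_add_one]
  rw [List.getElem?_drop, show idx + (i - idx) = i from by omega, wp_getElem? cs h]
  rfl

-- A's first loop computes delta0/delta1 (intervals component)
theorem wpA_loop_delta (cs : List Char) (r : List Char) :
    (∀ (i : Nat) (iv : Int × Int) (acc : List (Int × Int)), cs.drop i = r →
      ∃ f v, (PySem.List.pyRange (i : Int) (cs.length : Int) 1).foldl (wpA_body cs) (0, iv, acc)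
        = (f, v, acc ++ delta0 cs r i)) ∧
    (∀ (i a : Nat) (iv2 : Int) (acc : List (Int × Int)), cs.drop i = r →
      ∃ f v, (PySem.List.pyRange (i : Int) (cs.length : Int) 1).foldl (wpA_body cs) (1, ((a : Int), iv2), acc)
        = (f, v, acc ++ delta1 cs r i a)) := by
  induction r with
  | nil =>
    constructor
    · intro i iv acc h
      have hlen : cs.length ≤ i := by
        by_contra hlt
        have := congrArg List.length h
        simp [Nat.sub_eq_zero_iff_le] at this
        omega
      rw [PySem.List.pyRange_one_eq_nil (by exact_mod_cast hlen)]
      exact ⟨0, iv, by simp [delta0]⟩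
    · intro i a iv2 acc h
      have hlen : cs.length ≤ i := by
        by_contra hlt
        have := congrArg List.length h
        simp [Nat.sub_eq_zero_iff_le] at this
        omega
      rw [PySem.List.pyRange_one_eq_nil (by exact_mod_cast hlen)]
      exact ⟨1, ((a : Int), iv2), by simp [delta1]⟩
  | cons c r ih =>
    obtain ⟨ih0, ih1⟩ := ih
    have step : ∀ (i : Nat), cs.drop i = c :: r →
        (PySem.List.pyRange ((i : Int) + 1) (cs.length : Int) 1 = PySem.List.pyRange ((i + 1 : Nat) : Int) (cs.length : Int) 1) := by
      intro i _; norm_cast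
    constructor
    · intro i iv acc h
      have hlen := wp_len cs h
      have hdrop := wp_drop_succ cs h
      have hchar : PySem.List.pyGetD cs (i : Int) ' ' = c := by
        rw [PySem.List.pyGetD_natCast, List.getD_eq_getElem?_getD, wp_getElem? cs h]; rfl
      rw [PySem.List.pyRange_one_cons (by omega), List.foldl_cons, step i h]
      by_cases hc : is_float c
      · by_cases hr : r = []
        · subst hr
          have hlast : (i : Int) = (cs.length : Int) - 1 := by simp at hlen; omega
          have hbody : wpA_body cs (0, iv, acc) (i : Int)
              = (1, ((i : Int), iv.2), acc ++ [((i : Int), (i : Int) + 1)]) := by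
            simp [wpA_body, hchar, hc, if_pos hlast]
          obtain ⟨f, v, hfold⟩ := ih1 (i + 1) i iv.2 (acc ++ [((i : Int), (i : Int) + 1)]) hdrop
          exact ⟨f, v, by rw [hbody, hfold]; simp [delta0, delta1, hc]⟩
        · have hlast : ¬ ((i : Int) = (cs.length : Int) - 1) := by
            have : r.length ≠ 0 := by simpa using (List.length_eq_zero_iff).not.mpr hr
            omega
          have hbody : wpA_body cs (0, iv, acc) (i : Int)
              = (1, ((i : Int), iv.2), acc) := by
            simp [wpA_body, hchar, hc, hlast]
          obtain ⟨f, v, hfold⟩ := ih1 (i + 1) i iv.2 acc hdrop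
          exact ⟨f, v, by rw [hbody, hfold]; simp [delta0, hc, hr]⟩
      · have hbody : wpA_body cs (0, iv, acc) (i : Int) = (0, iv, acc) := by
          simp [wpA_body, hchar, hc]
        obtain ⟨f, v, hfold⟩ := ih0 (i + 1) iv acc hdrop
        exact ⟨f, v, by rw [hbody, hfold]; simp [delta0, hc]⟩
    · intro i a iv2 acc h
      have hlen := wp_len cs h
      have hdrop := wp_drop_succ cs h
      have hchar : PySem.List.pyGetD cs (i : Int) ' ' = c := by
        rw [PySem.List.pyGetD_natCast, List.getD_eq_getElem?_getD, wp_getElem? cs h]; rfl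
      rw [PySem.List.pyRange_one_cons (by omega), List.foldl_cons, step i h]
      by_cases hc : is_float c
      · by_cases hr : r = []
        · subst hr
          have hlast : (i : Int) = (cs.length : Int) - 1 := by simp at hlen; omega
          have hbody : wpA_body cs (1, ((a : Int), iv2), acc) (i : Int)
              = (1, ((a : Int), (i : Int)), acc ++ [((a : Int), (i : Int))]) := by
            simp [wpA_body, hchar, hc, if_pos hlast]
          obtain ⟨f, v, hfold⟩ := ih1 (i + 1) a (i : Int) (acc ++ [((a : Int), (i : Int))]) hdrop
          exact ⟨f, v, by rw [hbody, hfold]; simp [delta1, hc]⟩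
        · have hlast : ¬ ((i : Int) = (cs.length : Int) - 1) := by
            have : r.length ≠ 0 := by simpa using (List.length_eq_zero_iff).not.mpr hr
            omega
          have hbody : wpA_body cs (1, ((a : Int), iv2), acc) (i : Int)
              = (1, ((a : Int), iv2), acc) := by
            simp [wpA_body, hchar, hc, hlast]
          obtain ⟨f, v, hfold⟩ := ih1 (i + 1) a iv2 acc hdrop
          exact ⟨f, v, by rw [hbody, hfold]; simp [delta1, hc, hr]⟩
      · have hbody : wpA_body cs (1, ((a : Int), iv2), acc) (i : Int)
            = (0, ((a : Int), (i : Int) - 1), acc ++ [((a : Int), (i : Int) - 1)]) := by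
          simp [wpA_body, hchar, hc]
        obtain ⟨f, v, hfold⟩ := ih0 (i + 1) ((a : Int), (i : Int) - 1) (acc ++ [((a : Int), (i : Int) - 1)]) hdrop
        exact ⟨f, v, by rw [hbody, hfold]; simp [delta1, hc]⟩

-- rebuild of an interval list, recursively
def wpRB (cs : List Char) : List (Int × Int) → Int → List Char
  | [], idx => PySem.Chars.slice cs (some idx) none
  | (a, b) :: ps, idx =>
      PySem.Chars.slice cs (some idx) (some a) ++ numChars ++ wpRB cs ps (b + 1)

-- A's second loop computes wpRB
theorem wpA_rebuild_eq (cs : List Char) (ps : List (Int × Int)) :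
    ∀ (idx : Int) (proc : List Char),
      (ps.foldl (wpA_rebuild cs) (idx, proc)).2
        ++ PySem.Chars.slice cs (some (ps.foldl (wpA_rebuild cs) (idx, proc)).1) none
      = proc ++ wpRB cs ps idx := by
  induction ps with
  | nil => intro idx proc; simp [wpRB]
  | cons p ps ih =>
    intro idx proc
    obtain ⟨a, b⟩ := p
    simp only [List.foldl_cons]
    rw [show wpA_rebuild cs (idx, proc) (a, b)
          = (b + 1, proc ++ PySem.Chars.slice cs (some idx) (some a) ++ numChars) from rfl, ih]
    simp [wpRB, List.append_assoc]

-- rebuilding the deltas gives wpG / wpGRun (the delta1 half is only needed for r ≠ [],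
-- the only way A's loop leaves a run open)
theorem wpRB_delta (cs : List Char) (r : List Char) :
    (∀ (i idx : Nat), cs.drop i = r → idx ≤ i →
      wpRB cs (delta0 cs r i) (idx : Int)
        = PySem.Chars.slice cs (some (idx : Int)) (some (i : Int)) ++ wpG r) ∧
    (∀ (i a idx : Nat), cs.drop i = r → idx ≤ a → a ≤ i → r ≠ [] →
      wpRB cs (delta1 cs r i a) (idx : Int)
        = PySem.Chars.slice cs (some (idx : Int)) (some (a : Int)) ++ numChars ++ wpGRun r) := by
  induction r with
  | nil =>
    refine ⟨?_, fun _ _ _ _ _ _ hne => absurd rfl hne⟩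
    intro i idx h hidx
    have hlen : cs.length ≤ i := by
      by_contra hlt
      have := congrArg List.length h
      simp [Nat.sub_eq_zero_iff_le] at this
      omega
    simp only [delta0, wpRB, wpG, PySem.Chars.slice_eq_listSlice,
      PySem.List.slice_natCast, PySem.List.slice_from_natCast, List.append_nil]
    rw [List.take_of_length_le (by simp; omega)]
  | cons c r ih =>
    obtain ⟨ih0, ih1⟩ := ih
    constructor
    · intro i idx h hidx
      have hlen := wp_len cs h
      have hdrop := wp_drop_succ cs h
      by_cases hc : is_float c
      · by_cases hr : r = []
        · subst hr
          simp only [delta0, hc, if_true, wpRB, wpG, wpGRun,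
            PySem.Chars.slice_eq_listSlice]
          rw [show ((i : Nat) : Int) + 1 + 1 = (((i + 2 : Nat)) : Int) from by push_cast; ring,
            PySem.List.slice_from_natCast, List.drop_of_length_le (by simp at hlen; omega)]
          simp
        · simp only [delta0, hc, if_true, if_neg hr, wpG]
          rw [ih1 (i + 1) i idx hdrop hidx (by omega) hr]
          simp [List.append_assoc]
      · simp [delta0, hc, wpG]
        rw [ih0 (i + 1) idx hdrop (by omega)]
        simp only [PySem.Chars.slice_eq_listSlice, PySem.List.slice_natCast]
        rw [wp_take_succ cs h hidx]
        simp [List.append_assoc]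
    · intro i a idx h hidx hai _
      have hlen := wp_len cs h
      have hdrop := wp_drop_succ cs h
      by_cases hc : is_float c
      · by_cases hr : r = []
        · subst hr
          simp only [delta1, hc, if_true, wpRB, wpGRun,
            PySem.Chars.slice_eq_listSlice]
          rw [show ((i : Nat) : Int) + 1 = (((i + 1 : Nat)) : Int) from by push_cast; ring,
            PySem.List.slice_from_natCast, List.drop_of_length_le (by simp at hlen; omega)]
        · simp only [delta1, hc, if_true, if_neg hr, wpGRun]
          exact ih1 (i + 1) a idx hdrop hidx (by omega) hr
      · simp [delta1, hc, wpRB, wpGRun]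
        rw [ih0 (i + 1) i hdrop (by omega)]
        have hslice : PySem.Chars.slice cs (some (i : Int)) (some ((i + 1 : Nat) : Int)) = [c] := by
          simp only [PySem.Chars.slice_eq_listSlice, PySem.List.slice_natCast]
          simp [h]
        rw [hslice]
        simp

-- ===== VERDICT (by name: the statement is the Claim_ definition above) =====
theorem word_process_spec : Claim_equal_word_process := by
  intro word _
  unfold Spec_word_process word_process word_process_alt
  by_cases hg : word.toList.length = 1 ∧ ¬ PySem.Chars.strIsdigit word.toList
  · rw [if_pos hg, if_pos hg]
  · rw [if_neg hg, if_neg hg]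
    dsimp only
    obtain ⟨f, v, hfold⟩ := (wpA_loop_delta word.toList word.toList).1 0 (0, 0) [] (by simp)
    have h0 : ((0 : Nat) : Int) = 0 := rfl
    rw [h0] at hfold
    rw [hfold]
    rw [wpA_rebuild_eq]
    have hA := (wpRB_delta word.toList word.toList).1 0 0 (by simp) (le_refl 0)
    rw [h0] at hA
    simp only [List.nil_append]
    rw [hA]
    have hB := wpB_loop_flatten word.toList false []
    simp only [Bool.false_eq_true, if_false, List.flatten_nil, List.nil_append] at hB
    rw [hB]
    simp only [PySem.Chars.slice_eq_listSlice]
    rw [show (0 : Int) = ((0 : Nat) : Int) from rfl, PySem.List.slice_natCast]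
    simp
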